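-- pv_equiv track=rewrite | github.com/jeffmallozzi/aoc2023 | src/day01.py | right_digit
-- ===== SOURCE A (Python) =====
-- digit_map = {
--     "one" : "1",
--     "two" : "2",
--     "three" : "3",
--     "four" : "4",
--     "five" : "5",
--     "six" : "6",
--     "seven" : "7",
--     "eight" : "8",
--     "nine" : "9"
-- }
--
-- digits = list(digit_map.keys()) + list(digit_map.values())
--
-- def right_digit(line):
--     positions = {
--         line.rfind(digit): digit
--         for digit in digits
--         if line.rfind(digit) >= 0
--     }
--     highest = positions[max(positions.keys())]
--     return highest if highest.isdecimal() else digit_map.get(highest)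
-- ===== SOURCE B (Python) =====
-- digit_map = {
--     "one" : "1",
--     "two" : "2",
--     "three" : "3",
--     "four" : "4",
--     "five" : "5",
--     "six" : "6",
--     "seven" : "7",
--     "eight" : "8",
--     "nine" : "9"
-- }
--
-- digits = list(digit_map.keys()) + list(digit_map.values())
--
-- def right_digit(line):
--     # scan positions from the right; first position with a match wins
--     for i in range(len(line) - 1, -1, -1):
--         for d in digits:
--             if line.startswith(d, i):
--                 return d if d.isdecimal() else digit_map[d]
-- ===== Notes on version B (the rewrite author's own statement) =====
-- stated objective: simpler
-- what changed: Instead of computing rfind for all 18 patterns, building a position-keyed dict and taking the max key, B scans positions right-to-left and returns at the first position where any pattern starts.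
import Mathlib
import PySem

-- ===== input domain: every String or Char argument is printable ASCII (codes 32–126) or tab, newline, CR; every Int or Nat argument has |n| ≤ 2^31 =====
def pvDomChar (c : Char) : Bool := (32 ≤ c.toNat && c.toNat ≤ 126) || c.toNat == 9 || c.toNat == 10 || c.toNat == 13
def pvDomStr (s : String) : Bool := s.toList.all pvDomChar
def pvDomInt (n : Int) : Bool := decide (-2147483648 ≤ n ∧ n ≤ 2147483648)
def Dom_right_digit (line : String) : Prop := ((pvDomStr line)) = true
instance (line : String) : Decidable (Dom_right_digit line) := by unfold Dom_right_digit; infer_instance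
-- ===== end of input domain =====

-- B replaces A's 18 rfind scans + position-keyed dict + max-key lookup by a single
-- right-to-left positional scan that returns at the first matching position (objective: simpler).

-- ===== PORT A =====
def digitMapA : PySem.Dict String String := PySem.Dict.ofList
  [("one", "1"), ("two", "2"), ("three", "3"), ("four", "4"), ("five", "5"),
   ("six", "6"), ("seven", "7"), ("eight", "8"), ("nine", "9")]

def digitsA : List String := digitMapA.keys ++ digitMapA.values

-- literal transliteration of A: dict comprehension {rfind d : d …}, max over keys, lookup.
-- Python's str.isdecimal is ported as strIsdigit (they agree on the candidates, all ASCII);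
-- 'digit_map.get(highest)' (always a hit when taken) and 'positions[max …]' are ported with
-- default "" — the defaults are unreachable; the ValueError of max([]) is the 'none' branch,
-- excluded by Pre_.
def right_digit (line : String) : String :=
  let positions : PySem.Dict Int String :=
    digitsA.foldl
      (fun acc d =>
        if 0 ≤ PySem.Str.rfind line d then acc.insert (PySem.Str.rfind line d) d else acc)
      PySem.Dict.empty
  match PySem.List.max? positions.keys (fun k => k) with
  | none => ""   -- Python: max(positions.keys()) raises ValueError; outside Pre_
  | some k =>
      let highest := positions.getD k ""
      if PySem.Str.strIsdigit highest then highest else (digitMapA.get? highest).getD ""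

-- ===== PORT B =====
def digitMapB : PySem.Dict String String := PySem.Dict.ofList
  [("one", "1"), ("two", "2"), ("three", "3"), ("four", "4"), ("five", "5"),
   ("six", "6"), ("seven", "7"), ("eight", "8"), ("nine", "9")]

def digitsB : List String := digitMapB.keys ++ digitMapB.values

-- inner 'for d in digits: if line.startswith(d, i): return …' = first match at position n;
-- line.startswith(d, i) with 0 ≤ i ≤ len(line) is exactly 'd is a prefix of line[i:]'.
-- rdScanB s (n+1) visits position n, then recurses = 'for i in range(len-1, -1, -1)'.
def rdScanB (s : List Char) : Nat → String
  | 0 => ""   -- Python B falls off the loop and returns None; outside Pre_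
  | n + 1 =>
      match digitsB.find? (fun d => PySem.Chars.startswith (List.drop n s) d.toList) with
      | some d => if PySem.Str.strIsdigit d then d else (digitMapB.get? d).getD ""
      | none => rdScanB s n

def right_digit_alt (line : String) : String := rdScanB line.toList line.toList.length

-- ===== PRECONDITION & SPEC =====
-- Pre_ excludes exactly the lines containing none of the 18 patterns: there A raises
-- ValueError (max of an empty sequence) and B returns None (not a str).
def Pre_right_digit (line : String) : Prop :=
  (["one", "two", "three", "four", "five", "six", "seven", "eight", "nine",
    "1", "2", "3", "4", "5", "6", "7", "8", "9"].any
      (fun d => PySem.Str.isIn d line)) = true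
instance (line : String) : Decidable (Pre_right_digit line) := by
  unfold Pre_right_digit; infer_instance

def pvWitness_right_digit : String := "xtwone3x"

def Spec_right_digit (line : String) (out : String) : Prop := out = right_digit_alt line
instance (line : String) (out : String) : Decidable (Spec_right_digit line out) := by
  unfold Spec_right_digit; infer_instance

-- ===== CLAIM (what is proved, stated in full; the proofs are below) =====
def Claim_equal_right_digit : Prop :=
  ∀ (line : String), Dom_right_digit line → Pre_right_digit line →
    Spec_right_digit line (right_digit line)

-- ===== LEMMAS AND PROOFS =====

-- the common literal pattern list
def pvDL : List String :=
  ["one", "two", "three", "four", "five", "six", "seven", "eight", "nine",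
   "1", "2", "3", "4", "5", "6", "7", "8", "9"]

theorem pv_digitsA_eq : digitsA = pvDL := by decide
theorem pv_digitsB_eq : digitsB = pvDL := by decide

-- no pattern is a prefix of a different pattern
theorem pv_noprefix :
    ∀ d1 ∈ pvDL, ∀ d2 ∈ pvDL, d1.toList <+: d2.toList → d1 = d2 := by decide

-- every pattern is nonempty
theorem pv_nonempty : ∀ d ∈ pvDL, d.toList ≠ [] := by decide

-- the two final conversions agree on every pattern
theorem pv_conv_eq :
    ∀ d ∈ pvDL,
      (if PySem.Str.strIsdigit d then d else (digitMapA.get? d).getD "") =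
      (if PySem.Str.strIsdigit d then d else (digitMapB.get? d).getD "") := by decide


theorem pv_go_spec (s sub : List Char) (j : Nat) :
    (∃ k : Nat, k ≤ j ∧ PySem.Chars.rfind.go s sub j = (k : Int) ∧
        sub <+: s.drop k ∧ ∀ m : Nat, k < m → m ≤ j → ¬ sub <+: s.drop m)
    ∨ (PySem.Chars.rfind.go s sub j = -1 ∧ ∀ m : Nat, m ≤ j → ¬ sub <+: s.drop m) := by
  induction j with
  | zero =>
    by_cases h : sub <+: s.drop 0
    · left
      refine ⟨0, le_refl _, ?_, h, ?_⟩
      · simp only [PySem.Chars.rfind.go]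
        rw [if_pos]
        · rfl
        · exact List.isPrefixOf_iff_prefix.mpr (by simpa using h)
      · intro m h1 h2; omega
    · right
      constructor
      · simp only [PySem.Chars.rfind.go]
        rw [if_neg]
        intro hc
        exact h (by simpa using List.isPrefixOf_iff_prefix.mp hc)
      · intro m hm
        have : m = 0 := Nat.le_zero.mp hm
        subst this; exact h
  | succ j ih =>
    by_cases h : sub <+: s.drop (j + 1)
    · left
      refine ⟨j + 1, le_refl _, ?_, h, ?_⟩
      · simp only [PySem.Chars.rfind.go]
        rw [if_pos (List.isPrefixOf_iff_prefix.mpr h)]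
      · intro m h1 h2; omega
    · have hgo : PySem.Chars.rfind.go s sub (j + 1) = PySem.Chars.rfind.go s sub j := by
        simp only [PySem.Chars.rfind.go]
        rw [if_neg (fun hc => h (List.isPrefixOf_iff_prefix.mp hc))]
      rcases ih with ⟨k, hk, he, hp, hmx⟩ | ⟨he, hnone⟩
      · left
        refine ⟨k, Nat.le_succ_of_le hk, hgo.trans he, hp, ?_⟩
        intro m h1 h2
        rcases Nat.lt_succ_iff_lt_or_eq.mp (Nat.lt_succ_of_le h2) with h3 | h3
        · exact hmx m h1 (by omega)
        · subst h3; exact h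
      · right
        refine ⟨hgo.trans he, ?_⟩
        intro m hm
        by_cases h3 : m = j + 1
        · subst h3; exact h
        · exact hnone m (by omega)


theorem pv_fold_frozen (line : String) (i : Int) :
    ∀ (ds : List String) (acc : PySem.Dict Int String),
      (∀ d' ∈ ds, PySem.Str.rfind line d' ≠ i) →
      (ds.foldl (fun acc d =>
          if 0 ≤ PySem.Str.rfind line d then acc.insert (PySem.Str.rfind line d) d else acc)
        acc).get? i = acc.get? i := by
  intro ds
  induction ds with
  | nil => intro acc _; rfl
  | cons d0 tl ih =>
    intro acc hne
    simp only [List.foldl_cons]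
    rw [ih _ (fun d' hd' => hne d' (List.mem_cons_of_mem _ hd'))]
    by_cases h0 : 0 ≤ PySem.Str.rfind line d0
    · rw [if_pos h0, PySem.Dict.get?_insert_of_ne _ _ (Ne.symm (hne d0 List.mem_cons_self))]
    · rw [if_neg h0]

theorem pv_fold_get (line : String) (i : Int) (d : String) (hi : 0 ≤ i) :
    ∀ (ds : List String) (acc : PySem.Dict Int String), d ∈ ds →
      PySem.Str.rfind line d = i →
      (∀ d' ∈ ds, PySem.Str.rfind line d' = i → d' = d) →
      (ds.foldl (fun acc d =>
          if 0 ≤ PySem.Str.rfind line d then acc.insert (PySem.Str.rfind line d) d else acc)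
        acc).get? i = some d := by
  intro ds
  induction ds with
  | nil => intro acc h; exact absurd h (List.not_mem_nil)
  | cons d0 tl ih =>
    intro acc hmem hrf huniq
    simp only [List.foldl_cons]
    by_cases hd0 : PySem.Str.rfind line d0 = i
    · have hd0d : d0 = d := huniq d0 (List.mem_cons_self) hd0
      subst hd0d
      by_cases htl : ∀ d' ∈ tl, PySem.Str.rfind line d' ≠ i
      · rw [pv_fold_frozen line i tl _ htl]
        rw [if_pos (hd0 ▸ hi), hd0, PySem.Dict.get?_insert_self]
      · push Not at htl
        obtain ⟨d', hd', hrf'⟩ := htl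
        have : d' = d0 := huniq d' (List.mem_cons_of_mem _ hd') hrf'
        subst this
        exact ih _ hd' hrf (fun d'' h h' => huniq d'' (List.mem_cons_of_mem _ h) h')
    · have hmem' : d ∈ tl := by
        rcases List.mem_cons.mp hmem with h | h
        · exact absurd (h ▸ hrf) hd0
        · exact h
      exact ih _ hmem' hrf (fun d'' h h' => huniq d'' (List.mem_cons_of_mem _ h) h')

theorem pv_fold_keys (line : String) (i : Int) :
    ∀ (ds : List String) (acc : PySem.Dict Int String),
      (∀ k ∈ acc.keys, k ≤ i) →
      (∀ d' ∈ ds, PySem.Str.rfind line d' ≤ i) →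
      ∀ k ∈ (ds.foldl (fun acc d =>
          if 0 ≤ PySem.Str.rfind line d then acc.insert (PySem.Str.rfind line d) d else acc)
        acc).keys, k ≤ i := by
  intro ds
  induction ds with
  | nil => intro acc hacc _; exact hacc
  | cons d0 tl ih =>
    intro acc hacc hle
    simp only [List.foldl_cons]
    refine ih _ ?_ (fun d' h => hle d' (List.mem_cons_of_mem _ h))
    intro k hk
    by_cases h0 : 0 ≤ PySem.Str.rfind line d0
    · rw [if_pos h0] at hk
      rcases (PySem.Dict.mem_keys_insert _ _ _ _).mp hk with h | h
      · exact h ▸ hle d0 (List.mem_cons_self)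
      · exact hacc k h
    · rw [if_neg h0] at hk
      exact hacc k hk

theorem pv_unique (t : List Char) :
    ∀ d1 ∈ pvDL, ∀ d2 ∈ pvDL, d1.toList <+: t → d2.toList <+: t → d1 = d2 := by
  intro d1 h1 d2 h2 p1 p2
  rcases List.prefix_or_prefix_of_prefix p1 p2 with h | h
  · exact pv_noprefix d1 h1 d2 h2 h
  · exact (pv_noprefix d2 h2 d1 h1 h).symm

theorem pv_scan_eq (s : List Char) :
    ∀ (n i : Nat) (d : String), i < n → d ∈ pvDL → d.toList <+: s.drop i →
      (∀ j : Nat, i < j → j < n → ∀ d' ∈ pvDL, ¬ d'.toList <+: s.drop j) →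
      rdScanB s n = (if PySem.Str.strIsdigit d then d else (digitMapB.get? d).getD "") := by
  intro n
  induction n with
  | zero => intro i d h; omega
  | succ m ih =>
    intro i d hin hd hpre hmax
    by_cases him : i = m
    · subst him
      rcases hfind : digitsB.find?
          (fun d' => PySem.Chars.startswith (List.drop i s) d'.toList) with _ | d''
      · exfalso
        have := List.find?_eq_none.mp hfind d (pv_digitsB_eq ▸ hd)
        exact this ((PySem.Chars.startswith_iff _ _).mpr hpre)
      · have hp'' := List.find?_some hfind
        have hm'' : d'' ∈ pvDL := pv_digitsB_eq ▸ List.mem_of_find?_eq_some hfind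
        have : d'' = d :=
          pv_unique (s.drop i) d'' hm'' d hd ((PySem.Chars.startswith_iff _ _).mp hp'') hpre
        subst this
        simp only [rdScanB, hfind]
    · have him' : i < m := by omega
      have hnone : digitsB.find?
          (fun d' => PySem.Chars.startswith (List.drop m s) d'.toList) = none := by
        apply List.find?_eq_none.mpr
        intro d' hd' hc
        exact hmax m him' (Nat.lt_succ_self m) d' (pv_digitsB_eq ▸ hd')
          ((PySem.Chars.startswith_iff _ _).mp hc)
      simp only [rdScanB, hnone]
      exact ih i d him' hd hpre (fun j h1 h2 => hmax j h1 (by omega))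

theorem right_digit_spec' (line : String)
    (i : Nat) (d : String) (hd : d ∈ pvDL)
    (hpre : d.toList <+: line.toList.drop i)
    (hmax : ∀ j : Nat, i < j → ∀ d' ∈ pvDL, ¬ d'.toList <+: line.toList.drop j) :
    right_digit line = right_digit_alt line := by
  set s := line.toList with hs
  -- i is within the string
  have hilen : i < s.length := by
    by_contra h
    have : s.drop i = [] := List.drop_eq_nil_of_le (by omega)
    rw [this] at hpre
    exact pv_nonempty d hd (List.prefix_nil.mp hpre)
  -- rfind facts
  have hrfd : PySem.Str.rfind line d = (i : Int) := by
    rw [PySem.Str.rfind_eq]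
    show PySem.Chars.rfind.go s d.toList s.length = (i : Int)
    rcases pv_go_spec s d.toList s.length with ⟨k, hk, he, hp, hmx⟩ | ⟨_, hnone⟩
    · have : k = i := by
        rcases Nat.lt_trichotomy k i with h | h | h
        · exact absurd hpre (hmx i h (by omega))
        · exact h
        · exact absurd hp (hmax k h d hd)
      rw [he, this]
    · exact absurd hpre (hnone i (by omega))
  have hle : ∀ d' ∈ pvDL, PySem.Str.rfind line d' ≤ (i : Int) := by
    intro d' hd'
    rw [PySem.Str.rfind_eq]
    show PySem.Chars.rfind.go s d'.toList s.length ≤ (i : Int)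
    rcases pv_go_spec s d'.toList s.length with ⟨k, _, he, hp, _⟩ | ⟨he, _⟩
    · rw [he]
      by_contra h
      exact hmax k (by exact_mod_cast by omega) d' hd' hp
    · rw [he]; omega
  have huniq : ∀ d' ∈ pvDL, PySem.Str.rfind line d' = (i : Int) → d' = d := by
    intro d' hd' he'
    rw [PySem.Str.rfind_eq] at he'
    have he'' : PySem.Chars.rfind.go s d'.toList s.length = (i : Int) := he'
    rcases pv_go_spec s d'.toList s.length with ⟨k, _, he, hp, _⟩ | ⟨he, _⟩
    · have : (k : Int) = (i : Int) := by rw [← he, he'']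
      have : k = i := by exact_mod_cast this
      subst this
      exact pv_unique (s.drop k) d' hd' d hd hp hpre
    · rw [he''] at he; omega
  -- A's side
  have hgetA :
      (digitsA.foldl (fun acc d =>
          if 0 ≤ PySem.Str.rfind line d then acc.insert (PySem.Str.rfind line d) d else acc)
        PySem.Dict.empty).get? (i : Int) = some d := by
    rw [pv_digitsA_eq]
    exact pv_fold_get line (i : Int) d (by omega) pvDL PySem.Dict.empty hd hrfd huniq
  have hA : right_digit line =
      (if PySem.Str.strIsdigit d then d else (digitMapA.get? d).getD "") := by
    unfold right_digit
    set positions := digitsA.foldl (fun acc d =>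
        if 0 ≤ PySem.Str.rfind line d then acc.insert (PySem.Str.rfind line d) d else acc)
      PySem.Dict.empty with hpos
    have hmemi : (i : Int) ∈ positions.keys := by
      by_contra h
      rw [← PySem.Dict.get?_eq_none_iff_not_mem_keys] at h
      rw [hgetA] at h
      exact Option.some_ne_none d h
    have hkeysle : ∀ k ∈ positions.keys, k ≤ (i : Int) := by
      rw [hpos, pv_digitsA_eq]
      exact pv_fold_keys line (i : Int) pvDL PySem.Dict.empty
        (by intro k hk; simp [PySem.Dict.keys_empty] at hk) hle
    rcases hmx : PySem.List.max? positions.keys (fun k => k) with _ | m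
    · rw [PySem.List.max?_eq_none_iff] at hmx
      rw [hmx] at hmemi
      exact absurd hmemi (List.not_mem_nil)
    · have hm1 : m ≤ (i : Int) := hkeysle m (PySem.List.max?_mem hmx)
      have hm2 : (i : Int) ≤ m := PySem.List.max?_isMax hmx (i : Int) hmemi
      have hmi : m = (i : Int) := le_antisymm hm1 hm2
      subst hmi
      simp only [hmx]
      rw [PySem.Dict.getD_of_get?_eq_some _ _ hgetA]
  -- B's side
  have hB : right_digit_alt line =
      (if PySem.Str.strIsdigit d then d else (digitMapB.get? d).getD "") := by
    unfold right_digit_alt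
    exact pv_scan_eq s s.length i d hilen hd hpre
      (fun j h1 _ d' hd' => hmax j h1 d' hd')
  rw [hA, hB, pv_conv_eq d hd]

theorem right_digit_spec : Claim_equal_right_digit := by
  intro line _ hPre
  unfold Pre_right_digit at hPre
  show right_digit line = right_digit_alt line
  rw [List.any_eq_true] at hPre
  obtain ⟨d0, hd0, hIn⟩ := hPre
  have hd0' : d0 ∈ pvDL := hd0
  set s := line.toList with hs
  rw [PySem.Str.isIn_eq] at hIn
  obtain ⟨j, hj⟩ := (PySem.Chars.exists_prefix_drop_iff_isIn d0.toList s).mpr hIn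
  have hjlen : j < s.length := by
    by_contra h
    have : List.drop j s = [] := List.drop_eq_nil_of_le (by omega)
    rw [this] at hj
    exact pv_nonempty d0 hd0' (List.prefix_nil.mp hj)
  set P : Nat → Prop := fun n => ∃ d' ∈ pvDL, d'.toList <+: s.drop n with hP
  have hPj : P j := ⟨d0, hd0', hj⟩
  have hPi : P (Nat.findGreatest P s.length) :=
    Nat.findGreatest_spec (le_of_lt hjlen) hPj
  obtain ⟨d, hd, hpre⟩ := hPi
  apply right_digit_spec' line (Nat.findGreatest P s.length) d hd hpre
  intro k hk d' hd' hc
  by_cases hklen : k ≤ s.length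
  · exact Nat.findGreatest_is_greatest hk hklen ⟨d', hd', hc⟩
  · have : s.drop k = [] := List.drop_eq_nil_of_le (by omega)
    rw [this] at hc
    exact pv_nonempty d' hd' (List.prefix_nil.mp hc)
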